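-- pv_equiv track=rewrite | github.com/yydaily/project-euler-solution | 148/solution.py | cal
-- ===== SOURCE A (Python) =====
-- def cal(a):
-- 	if a <= 7:
-- 		return int(a * (a+1) / 2)
-- 	base = 1
-- 	row = 1
-- 	while a > row * 7:
-- 		row *= 7
-- 		base *= 28
-- 	cnt = int(a / row)
-- 	ret = int(cnt * (cnt + 1) / 2) * base
-- 	return ret + (cnt + 1) * cal(a - cnt * row)
-- ===== SOURCE B (Python) =====
-- def cal(a):
--     # Extract the base-7 digits of a (most significant first), then one pass:
--     # digit d at power p contributes prod * T(d) * 28**p, and prod *= d+1.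
--     digits = []
--     n = a
--     while n > 0:
--         digits.append(n % 7)
--         n //= 7
--     digits.reverse()
--     ans = 0
--     prod = 1
--     p = len(digits)
--     for d in digits:
--         p -= 1
--         ans += prod * (d * (d + 1) // 2) * 28 ** p
--         prod *= d + 1
--     return ans
-- ===== Notes on version B (the rewrite author's own statement) =====
-- stated objective: simpler
-- what changed: Replaces A's recursion with an inner power-finding while-loop by a single explicit pass over the precomputed base-7 digit list of a, maintaining a running product and accumulator; Pre_ restricts to the natural domain of nonnegative a (a counts rows of Pascal's triangle), where A's float divisions are exact.
-- outside the precondition, e.g. on cal(-5): A returns 10, B returns 0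
import Mathlib
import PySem

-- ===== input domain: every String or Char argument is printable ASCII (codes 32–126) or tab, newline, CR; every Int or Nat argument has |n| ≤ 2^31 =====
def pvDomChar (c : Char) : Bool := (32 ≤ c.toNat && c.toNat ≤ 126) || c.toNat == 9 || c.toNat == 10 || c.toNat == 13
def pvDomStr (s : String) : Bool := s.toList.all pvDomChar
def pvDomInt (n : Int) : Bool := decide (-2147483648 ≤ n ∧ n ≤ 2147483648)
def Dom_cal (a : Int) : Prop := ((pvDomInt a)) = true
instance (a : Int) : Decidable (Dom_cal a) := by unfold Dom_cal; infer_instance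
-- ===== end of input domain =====

-- B replaces A's recursion-with-inner-while by one explicit pass over the base-7 digits of a
-- (objective: simpler / different decomposition; not claimed faster).
-- On Pre_ (0 ≤ a) every `int(x / y)` in A is an exact floor division (float-exact sizes), ported as floordiv.

-- ===== PORT A =====
-- the inner `while a > row * 7: row *= 7; base *= 28` loop of A; fuel is only a totality
-- guard (an upper bound on the number of iterations) and is never exhausted when the loop
-- is entered with fuel = a.toNat ≥ number of iterations, so the loop runs exactly as in Python
def calFind (a : Int) (fuel : Nat) (row base : Int) : Int × Int :=
  match fuel with
  | 0 => (row, base)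
  | fuel + 1 => if a > row * 7 then calFind a fuel (row * 7) (base * 28) else (row, base)

-- A's recursion, with fuel as a totality guard: every recursive call strictly decreases
-- a.toNat, so with initial fuel a.toNat the fuel-0 case is only reached with a ≤ 0 ≤ 7,
-- where it coincides with A's base branch
def calGo (fuel : Nat) (a : Int) : Int :=
  match fuel with
  | 0 => PySem.Int.floordiv (a * (a + 1)) 2
  | fuel + 1 =>
    if a ≤ 7 then PySem.Int.floordiv (a * (a + 1)) 2
    else
      let rb := calFind a a.toNat 1 1
      let cnt := PySem.Int.floordiv a rb.1
      PySem.Int.floordiv (cnt * (cnt + 1)) 2 * rb.2 + (cnt + 1) * calGo fuel (a - cnt * rb.1)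

def cal (a : Int) : Int := calGo a.toNat a

-- ===== PORT B =====
-- `while n > 0: digits.append(n % 7); n //= 7`
def digitsRev (n : Int) : List Int :=
  if h : 0 < n then PySem.Int.mod n 7 :: digitsRev (PySem.Int.floordiv n 7) else []
termination_by n.toNat
decreasing_by
  rw [PySem.Int.floordiv_eq_ediv_of_pos (by norm_num : (0:Int) < 7)]; omega

-- one step of B's for-loop; state = (ans, prod, p); p stays ≥ 0, so `28 ** p` is 28 ^ p.toNat
def calAltStep (s : Int × Int × Int) (d : Int) : Int × Int × Int :=
  (s.1 + s.2.1 * PySem.Int.floordiv (d * (d + 1)) 2 * 28 ^ (s.2.2 - 1).toNat,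
   s.2.1 * (d + 1), s.2.2 - 1)

def cal_alt (a : Int) : Int :=
  let digits := (digitsRev a).reverse
  (digits.foldl calAltStep (0, 1, (digits.length : Int))).1

-- ===== PRECONDITION & SPEC =====
-- Pre_ restricts to the natural domain of nonnegative a (a counts rows of Pascal's triangle); for
-- negative a the two programs sensibly differ: A returns the float-truncated int(a*(a+1)/2)
-- while B's digit loop never runs there (see the cite in claim.json).
def Pre_cal (a : Int) : Prop := 0 ≤ a
instance (a : Int) : Decidable (Pre_cal a) := by unfold Pre_cal; infer_instance
def pvWitness_cal : Int := (10)

def Spec_cal (a : Int) (out : Int) : Prop := out = cal_alt a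
instance (a : Int) (out : Int) : Decidable (Spec_cal a out) := by unfold Spec_cal; infer_instance

-- ===== CLAIM (what is proved, stated in full; the proofs are below) =====
def Claim_equal_cal : Prop := ∀ (a : Int), Dom_cal a → Pre_cal a → Spec_cal a (cal a)

-- ===== LEMMAS AND PROOFS =====

-- triangular term int(d*(d+1)/2)
def triT (x : Int) : Int := PySem.Int.floordiv (x * (x + 1)) 2

-- value of B's loop on a most-significant-first digit list
def digG : List Int → Int
  | [] => 0
  | d :: ds => triT d * 28 ^ ds.length + (d + 1) * digG ds

-- the running product over a digit list
def digP : List Int → Int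
  | [] => 1
  | d :: ds => (d + 1) * digP ds

theorem digP_append (l : List Int) (x : Int) : digP (l ++ [x]) = digP l * (x + 1) := by
  induction l with
  | nil => simp [digP]
  | cons d ds ih => simp [digP, ih]; ring

theorem digG_append (l : List Int) (x : Int) :
    digG (l ++ [x]) = 28 * digG l + digP l * triT x := by
  induction l with
  | nil => simp [digG, digP]
  | cons d ds ih => simp [digG, digP, ih, pow_succ]; ring

theorem fold_spec (ds : List Int) (ans prod : Int) (p : Int) (hp : p = ds.length) :
    (ds.foldl calAltStep (ans, prod, p)).1 = ans + prod * digG ds := by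
  induction ds generalizing ans prod p with
  | nil => simp [digG]
  | cons d t ih =>
    simp only [List.foldl, calAltStep]
    rw [ih _ _ _ (by simp [hp])]
    have : (p - 1).toNat = t.length := by simp at hp; omega
    rw [this, digG]; simp only [triT]; ring

theorem cal_alt_eq (a : Int) : cal_alt a = digG (digitsRev a).reverse := by
  unfold cal_alt
  rw [fold_spec _ 0 1 _ (by simp)]; ring

theorem digitsRev_pos {n : Int} (h : 0 < n) :
    digitsRev n = n % 7 :: digitsRev (n / 7) := by
  rw [digitsRev.eq_def, dif_pos h,
    PySem.Int.floordiv_eq_ediv_of_pos (by norm_num : (0:Int) < 7),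
    PySem.Int.mod_eq_emod_of_pos (by norm_num : (0:Int) < 7)]

theorem digitsRev_nonpos {n : Int} (h : n ≤ 0) : digitsRev n = [] := by
  rw [digitsRev.eq_def, dif_neg (by omega)]

-- arithmetic: pulling one base-7 digit out of a remainder
theorem mod_pow_div (a : Int) (k : Nat) (ha : 0 ≤ a) :
    a % 7 ^ (k + 1) / 7 = a / 7 % 7 ^ k := by
  have h7k : (0:Int) < 7 ^ k := by positivity
  have h7k1 : (0:Int) < 7 ^ (k + 1) := by positivity
  set q := a / 7 ^ (k + 1) with hqdef
  set r := a % 7 ^ (k + 1) with hrdef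
  have hr0 : 0 ≤ r := Int.emod_nonneg a h7k1.ne'
  have hr1 : r < 7 ^ (k + 1) := Int.emod_lt_of_pos a h7k1
  have hq : a = r + 7 ^ k * q * 7 := by
    rw [hrdef, hqdef, Int.emod_def, pow_succ]; ring
  have hdiv7 : a / 7 = r / 7 + 7 ^ k * q := by
    conv_lhs => rw [hq]
    rw [Int.add_mul_ediv_right _ _ (by norm_num : (7:Int) ≠ 0)]
  have hrlt : r / 7 < 7 ^ k := by
    rw [Int.ediv_lt_iff_lt_mul (by norm_num : (0:Int) < 7)]
    calc r < 7 ^ (k + 1) := hr1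
    _ = 7 ^ k * 7 := by rw [pow_succ]
  have hrge : 0 ≤ r / 7 := Int.ediv_nonneg hr0 (by norm_num)
  rw [hdiv7, Int.add_mul_emod_self_left, Int.emod_eq_of_lt hrge hrlt]

theorem mod_pow_mod (a : Int) (k : Nat) : a % 7 ^ (k + 1) % 7 = a % 7 := by
  exact Int.emod_emod_of_dvd a ⟨7 ^ k, by rw [pow_succ]; ring⟩

theorem digP_shift (r : Int) (h : 0 ≤ r) :
    digP (digitsRev r).reverse = digP (digitsRev (r / 7)).reverse * (r % 7 + 1) := by
  rcases eq_or_lt_of_le h with h0 | hpos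
  · rw [← h0, show ((0:Int) / 7) = 0 from by decide, show ((0:Int) % 7) = 0 from by decide,
        digitsRev_nonpos (le_refl (0:Int))]
    decide
  · rw [digitsRev_pos hpos, List.reverse_cons, digP_append]

theorem digG_shift (r : Int) (h : 0 ≤ r) :
    digG (digitsRev r).reverse
      = 28 * digG (digitsRev (r / 7)).reverse + digP (digitsRev (r / 7)).reverse * triT (r % 7) := by
  rcases eq_or_lt_of_le h with h0 | hpos
  · rw [← h0, show ((0:Int) / 7) = 0 from by decide, show ((0:Int) % 7) = 0 from by decide,
        digitsRev_nonpos (le_refl (0:Int))]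
    decide
  · rw [digitsRev_pos hpos, List.reverse_cons, digG_append]

theorem digP_main : ∀ (k : Nat) (a : Int), 7 ^ k ≤ a → a < 7 ^ (k + 1) →
    digP (digitsRev a).reverse = (a / 7 ^ k + 1) * digP (digitsRev (a % 7 ^ k)).reverse := by
  intro k
  induction k with
  | zero =>
    intro a h1 h2
    rw [pow_zero] at h1
    rw [zero_add, pow_one] at h2
    simp only [pow_zero, Int.ediv_one, Int.emod_one]
    rw [digitsRev_pos (by omega), Int.emod_eq_of_lt (by omega) h2,
        Int.ediv_eq_zero_of_lt (by omega) h2, digitsRev_nonpos (le_refl (0:Int))]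
    simp [digP]
  | succ k ih =>
    intro a h1 h2
    have h7k : (0:Int) < 7 ^ k := by positivity
    have ha0 : 0 < a := lt_of_lt_of_le (by positivity) h1
    have hd1 : 7 ^ k ≤ a / 7 := by
      rw [Int.le_ediv_iff_mul_le (by norm_num : (0:Int) < 7)]
      calc 7 ^ k * 7 = 7 ^ (k + 1) := (pow_succ 7 k).symm
      _ ≤ a := h1
    have hd2 : a / 7 < 7 ^ (k + 1) := by
      rw [Int.ediv_lt_iff_lt_mul (by norm_num : (0:Int) < 7)]
      calc a < 7 ^ (k + 2) := h2
      _ = 7 ^ (k + 1) * 7 := by rw [pow_succ]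
    have hdd : a / 7 / 7 ^ k = a / 7 ^ (k + 1) := by
      rw [Int.ediv_ediv_of_nonneg (by norm_num : (0:Int) ≤ 7), ← pow_succ']
    rw [digitsRev_pos ha0, List.reverse_cons, digP_append, ih (a / 7) hd1 hd2, hdd,
        digP_shift (a % 7 ^ (k + 1)) (Int.emod_nonneg a (by positivity)),
        mod_pow_div a k (by omega), mod_pow_mod a k]
    ring

theorem digG_main : ∀ (k : Nat) (a : Int), 7 ^ k ≤ a → a ≤ 7 ^ (k + 1) →
    digG (digitsRev a).reverse
      = triT (a / 7 ^ k) * 28 ^ k + (a / 7 ^ k + 1) * digG (digitsRev (a % 7 ^ k)).reverse := by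
  intro k
  induction k with
  | zero =>
    intro a h1 h2
    rw [pow_zero] at h1
    rw [zero_add, pow_one] at h2
    simp only [pow_zero, Int.ediv_one, Int.emod_one]
    rcases eq_or_lt_of_le h2 with h7 | h7
    · subst h7
      rw [digitsRev_pos (by norm_num : (0:Int) < 7),
          show ((7:Int) % 7) = 0 from by decide, show ((7:Int) / 7) = 1 from by decide,
          digitsRev_pos (by norm_num : (0:Int) < 1),
          show ((1:Int) % 7) = 1 from by decide, show ((1:Int) / 7) = 0 from by decide,
          digitsRev_nonpos (le_refl (0:Int))]
      decide
    · rw [digitsRev_pos (by omega), Int.emod_eq_of_lt (by omega) h7,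
          Int.ediv_eq_zero_of_lt (by omega) h7, digitsRev_nonpos (le_refl (0:Int))]
      simp [digG]
  | succ k ih =>
    intro a h1 h2
    have h7k : (0:Int) < 7 ^ k := by positivity
    have h7k1 : (0:Int) < 7 ^ (k + 1) := by positivity
    have ha0 : 0 < a := lt_of_lt_of_le (by positivity) h1
    have hd1 : 7 ^ k ≤ a / 7 := by
      rw [Int.le_ediv_iff_mul_le (by norm_num : (0:Int) < 7)]
      calc 7 ^ k * 7 = 7 ^ (k + 1) := (pow_succ 7 k).symm
      _ ≤ a := h1
    have hd2 : a / 7 ≤ 7 ^ (k + 1) := by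
      have : a / 7 < 7 ^ (k + 1) + 1 := by
        rw [Int.ediv_lt_iff_lt_mul (by norm_num : (0:Int) < 7)]
        calc a ≤ 7 ^ (k + 2) := h2
        _ < (7 ^ (k + 1) + 1) * 7 := by rw [pow_succ]; nlinarith [h7k1]
      omega
    have hdd : a / 7 / 7 ^ k = a / 7 ^ (k + 1) := by
      rw [Int.ediv_ediv_of_nonneg (by norm_num : (0:Int) ≤ 7), ← pow_succ']
    by_cases hbig : a = 7 ^ (k + 2)
    · -- boundary: a = 7^(k+2); the remainder is 0 and both sides equal 28^(k+2)
      subst hbig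
      have e1 : (7:Int) ^ (k + 2) % 7 = 0 := by
        rw [show ((7:Int) ^ (k + 2)) = 7 * 7 ^ (k + 1) from by rw [pow_succ]; ring,
            Int.mul_emod_right]
      have e2 : (7:Int) ^ (k + 2) / 7 = 7 ^ (k + 1) := by
        rw [show ((7:Int) ^ (k + 2)) = 7 ^ (k + 1) * 7 from by rw [pow_succ],
            Int.mul_ediv_cancel _ (by norm_num : (7:Int) ≠ 0)]
      have e3 : (7:Int) ^ (k + 1) / 7 ^ k = 7 := by
        rw [show ((7:Int) ^ (k + 1)) = 7 ^ k * 7 from by rw [pow_succ],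
            Int.mul_ediv_cancel_left _ h7k.ne']
      have e4 : (7:Int) ^ (k + 1) % 7 ^ k = 0 := by
        rw [show ((7:Int) ^ (k + 1)) = 7 ^ k * 7 from by rw [pow_succ], Int.mul_emod_right]
      have e5 : (7:Int) ^ (k + 2) / 7 ^ (k + 1) = 7 := by
        rw [show ((7:Int) ^ (k + 2)) = 7 ^ (k + 1) * 7 from by rw [pow_succ],
            Int.mul_ediv_cancel_left _ h7k1.ne']
      have e6 : (7:Int) ^ (k + 2) % 7 ^ (k + 1) = 0 := by
        rw [show ((7:Int) ^ (k + 2)) = 7 ^ (k + 1) * 7 from by rw [pow_succ], Int.mul_emod_right]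
      rw [digitsRev_pos ha0, List.reverse_cons, digG_append, e1, e2,
          ih (7 ^ (k + 1)) (by nlinarith [h7k]) (le_refl _), e3, e4, e5, e6,
          digitsRev_nonpos (le_refl (0:Int))]
      simp [digG, show triT 7 = 28 from by decide, show triT 0 = 0 from by decide, pow_succ]
      ring
    · -- interior: the leading digit is below 7, so digP_main applies to a / 7
      have hd2' : a / 7 < 7 ^ (k + 1) := by
        rcases eq_or_lt_of_le hd2 with he | hlt
        · exfalso
          apply hbig
          have hdm := Int.ediv_add_emod a 7
          have hm0 : 0 ≤ a % 7 := Int.emod_nonneg a (by norm_num)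
          have hm1 : a % 7 < 7 := Int.emod_lt_of_pos a (by norm_num)
          have : 7 ^ (k + 2) ≤ a := by
            calc (7:Int) ^ (k + 2) = 7 ^ (k + 1) * 7 := by rw [pow_succ]
            _ = 7 * (a / 7) := by rw [← he]; ring
            _ ≤ 7 * (a / 7) + a % 7 := by omega
            _ = a := hdm
          have h2' : a ≤ 7 ^ (k + 2) := h2
          omega
        · exact hlt
      rw [digitsRev_pos ha0, List.reverse_cons, digG_append, ih (a / 7) hd1 hd2, hdd,
          digP_main k (a / 7) hd1 hd2',
          digG_shift (a % 7 ^ (k + 1)) (Int.emod_nonneg a (by positivity)),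
          mod_pow_div a k (by omega), mod_pow_mod a k, hdd]
      ring

theorem calFind_spec : ∀ (fuel : Nat) (a row base : Int), 0 < row → row < a →
    (a - row).toNat < fuel →
    ∃ k : Nat, calFind a fuel row base = (row * 7 ^ k, base * 28 ^ k) ∧
      row * 7 ^ k < a ∧ a ≤ row * 7 ^ k * 7 := by
  intro fuel
  induction fuel with
  | zero => intro a row base _ _ hf; omega
  | succ fuel ih =>
    intro a row base hr hlt hf
    rw [calFind]
    by_cases hgt : a > row * 7
    · rw [if_pos hgt]
      have h7 : row * 7 * 7 ^ 1 = row * 7 ^ 2 := by ring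
      obtain ⟨k, hk, h1, h2⟩ := ih a (row * 7) (base * 28) (by omega) (by omega) (by omega)
      refine ⟨k + 1, ?_, ?_, ?_⟩
      · rw [hk]; simp only [Prod.mk.injEq, pow_succ]; constructor <;> ring
      · have : row * 7 ^ (k + 1) = row * 7 * 7 ^ k := by rw [pow_succ]; ring
        omega
      · have : row * 7 ^ (k + 1) = row * 7 * 7 ^ k := by rw [pow_succ]; ring
        omega
    · rw [if_neg hgt]
      exact ⟨0, by simp, by simpa using hlt, by simp; omega⟩

theorem calGo_eq_digG : ∀ (fuel : Nat) (a : Int), 0 ≤ a → a.toNat ≤ fuel →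
    calGo fuel a = digG (digitsRev a).reverse := by
  intro fuel
  induction fuel with
  | zero =>
    intro a ha hf
    have : a = 0 := by omega
    subst this
    rw [calGo, digitsRev_nonpos (show (0:Int) ≤ 0 by decide)]
    decide
  | succ fuel ih =>
    intro a ha hf
    by_cases hle : a ≤ 7
    · rw [calGo]
      interval_cases a
      · rw [if_pos (by norm_num : (0:Int) ≤ 7), digitsRev_nonpos (show (0:Int) ≤ 0 by decide)]
        decide
      · rw [if_pos (by norm_num : (1:Int) ≤ 7), digitsRev_pos (show (0:Int) < 1 by decide),
            digitsRev_nonpos (show (1:Int)/7 ≤ 0 by decide)]; decide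
      · rw [if_pos (by norm_num : (2:Int) ≤ 7), digitsRev_pos (show (0:Int) < 2 by decide),
            digitsRev_nonpos (show (2:Int)/7 ≤ 0 by decide)]; decide
      · rw [if_pos (by norm_num : (3:Int) ≤ 7), digitsRev_pos (show (0:Int) < 3 by decide),
            digitsRev_nonpos (show (3:Int)/7 ≤ 0 by decide)]; decide
      · rw [if_pos (by norm_num : (4:Int) ≤ 7), digitsRev_pos (show (0:Int) < 4 by decide),
            digitsRev_nonpos (show (4:Int)/7 ≤ 0 by decide)]; decide
      · rw [if_pos (by norm_num : (5:Int) ≤ 7), digitsRev_pos (show (0:Int) < 5 by decide),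
            digitsRev_nonpos (show (5:Int)/7 ≤ 0 by decide)]; decide
      · rw [if_pos (by norm_num : (6:Int) ≤ 7), digitsRev_pos (show (0:Int) < 6 by decide),
            digitsRev_nonpos (show (6:Int)/7 ≤ 0 by decide)]; decide
      · rw [if_pos (by norm_num : (7:Int) ≤ 7), digitsRev_pos (show (0:Int) < 7 by decide),
            digitsRev_pos (show (0:Int) < 7/7 by decide),
            digitsRev_nonpos (show (7:Int)/7/7 ≤ 0 by decide)]; decide
    · push_neg at hle
      obtain ⟨k, hk, h1, h2⟩ :=
        calFind_spec a.toNat a 1 1 (by norm_num) (by omega) (by omega)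
      rw [calGo, if_neg (by omega : ¬ a ≤ 7)]
      simp only [hk, one_mul]
      have hp : (0:Int) < 7 ^ k := by positivity
      rw [PySem.Int.floordiv_eq_ediv_of_pos hp]
      have hmod : a - a / 7 ^ k * 7 ^ k = a % 7 ^ k := by rw [Int.emod_def]; ring
      rw [hmod]
      have hrnn : 0 ≤ a % 7 ^ k := Int.emod_nonneg a hp.ne'
      have hrlt : a % 7 ^ k < 7 ^ k := Int.emod_lt_of_pos a hp
      rw [ih (a % 7 ^ k) hrnn (by omega)]
      rw [digG_main k a (by omega) (by rw [pow_succ]; omega)]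
      simp only [triT]

theorem cal_spec : Claim_equal_cal := by
  intro a _ hpre
  unfold Spec_cal
  rw [cal_alt_eq, cal, calGo_eq_digG a.toNat a hpre (le_refl _)]
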